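-- pv_equiv track=rewrite | github.com/yousafe007/CS50P | w5/test_plates/plates.py | mid_no
-- ===== SOURCE A (Python) =====
-- def mid_no(s):
--     is_num = False
--     if not s[0].isalpha():
--         return False
--     for c in s[1:]:
--         if not c.isalpha() and is_num == False:
--             if c=='0':
--                 return False
--             is_num = True
--         elif c.isnumeric() and is_num == False:
--             return False
--         elif c.isalpha() and is_num == True:
--             return False
--
--     return True
-- ===== SOURCE B (Python) =====
-- def mid_no(s):
--     # Boundary-then-suffix-check decomposition instead of A's state-flag scan.
--     if not s[0].isalpha():
--         return False
--     i = 1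
--     while i < len(s) and s[i].isalpha():
--         i += 1
--     rest = s[i:]
--     if not rest:
--         return True
--     return rest[0] != '0' and not any(c.isalpha() for c in rest[1:])
-- ===== Notes on version B (the rewrite author's own statement) =====
-- stated objective: simpler
-- what changed: Replaces A's single pass with an is_num state flag and three-way branching by finding the end of the leading letter-run, then checking the suffix directly (first suffix char is not '0', no letters after it).
import Mathlib
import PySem

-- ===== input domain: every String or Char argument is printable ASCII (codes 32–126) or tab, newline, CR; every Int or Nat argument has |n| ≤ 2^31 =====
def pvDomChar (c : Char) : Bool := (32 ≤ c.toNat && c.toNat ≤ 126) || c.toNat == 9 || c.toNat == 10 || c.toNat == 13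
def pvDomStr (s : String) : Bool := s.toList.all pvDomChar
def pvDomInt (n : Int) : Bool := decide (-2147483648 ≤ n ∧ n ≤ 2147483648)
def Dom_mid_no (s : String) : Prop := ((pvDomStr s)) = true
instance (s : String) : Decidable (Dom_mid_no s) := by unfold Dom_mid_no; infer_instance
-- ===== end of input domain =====

-- B replaces A's state-flag pass by finding the leading letter-run boundary and checking the suffix; objective: simpler decomposition, same O(n) cost.
-- Both programs raise IndexError on "" (excluded by Pre_mid_no).

-- ===== PORT A =====
-- the for-loop over s[1:] carrying the is_num flag
-- c.isnumeric() is ported as PySem.Chars.isdigit: exact on the printable-ASCII domain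
def midALoop (cs : List Char) (is_num : Bool) : Bool :=
  match cs with
  | [] => true
  | c :: rest =>
    if !PySem.Chars.isalpha c && is_num == false then
      if c == '0' then false else midALoop rest true
    else if PySem.Chars.isdigit c && is_num == false then false
    else if PySem.Chars.isalpha c && is_num == true then false
    else midALoop rest is_num

def mid_no (s : String) : Bool :=
  match s.toList with
  | [] => false  -- unreachable under Pre_mid_no (Python raises IndexError on "")
  | c :: rest => if !PySem.Chars.isalpha c then false else midALoop rest false

-- ===== PORT B =====
def mid_no_alt (s : String) : Bool :=
  match s.toList with
  | [] => false  -- unreachable under Pre_mid_no (Python raises IndexError on "")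
  | c :: tail =>
    if !PySem.Chars.isalpha c then false
    else
      -- the while loop advancing i over letters ≡ dropping the leading letter-run of tail
      match tail.dropWhile PySem.Chars.isalpha with
      | [] => true
      | r :: rs => (r != '0') && !(rs.any PySem.Chars.isalpha)

-- ===== PRECONDITION & SPEC =====
-- A (and B) raise IndexError on the empty string; Pre_ excludes exactly that input.
def Pre_mid_no (s : String) : Prop := s ≠ ""
instance (s : String) : Decidable (Pre_mid_no s) := by unfold Pre_mid_no; infer_instance
def pvWitness_mid_no : String := "AB12"

def Spec_mid_no (s : String) (out : Bool) : Prop := out = mid_no_alt s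
instance (s : String) (out : Bool) : Decidable (Spec_mid_no s out) := by unfold Spec_mid_no; infer_instance

-- ===== CLAIM (what is proved, stated in full; the proofs are below) =====
def Claim_equal_mid_no : Prop := ∀ (s : String), Dom_mid_no s → Pre_mid_no s → Spec_mid_no s (mid_no s)

-- ===== LEMMAS AND PROOFS =====
lemma isdigit_of_isalpha {c : Char} (h : PySem.Chars.isalpha c = true) :
    PySem.Chars.isdigit c = false := by
  simp only [PySem.Chars.isalpha, PySem.Chars.isupper, PySem.Chars.islower, PySem.Chars.isdigit,
    Bool.or_eq_true, Bool.and_eq_true, decide_eq_true_eq, Bool.and_eq_false_iff,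
    decide_eq_false_iff_not, Char.le_def, UInt32.le_iff_toNat_le] at h ⊢
  have hA : ('A'.val).toNat = 65 := rfl
  have hZ : ('Z'.val).toNat = 90 := rfl
  have ha : ('a'.val).toNat = 97 := rfl
  have hz : ('z'.val).toNat = 122 := rfl
  have h0 : ('0'.val).toNat = 48 := rfl
  have h9 : ('9'.val).toNat = 57 := rfl
  omega

lemma midALoop_true (cs : List Char) :
    midALoop cs true = !(cs.any PySem.Chars.isalpha) := by
  induction cs with
  | nil => rfl
  | cons c rest ih =>
    by_cases h : PySem.Chars.isalpha c = true <;>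
      simp [midALoop, h, ih, isdigit_of_isalpha]

lemma midALoop_false (cs : List Char) :
    midALoop cs false =
      (match cs.dropWhile PySem.Chars.isalpha with
       | [] => true
       | r :: rs => (r != '0') && !(rs.any PySem.Chars.isalpha)) := by
  induction cs with
  | nil => rfl
  | cons c rest ih =>
    by_cases h : PySem.Chars.isalpha c = true
    · simp [midALoop, h, isdigit_of_isalpha h, ih]
    · simp only [Bool.not_eq_true] at h
      by_cases h0 : c = '0'
      · subst h0; simp [midALoop, h]
      · simp [midALoop, h, h0, midALoop_true]

-- ===== VERDICT (by name: the statement is the Claim_ definition above) =====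
theorem mid_no_spec : Claim_equal_mid_no := by
  intro s _ _
  unfold Spec_mid_no mid_no mid_no_alt
  cases s.toList with
  | nil => rfl
  | cons c tail =>
    by_cases h : PySem.Chars.isalpha c = true <;> simp [h, midALoop_false]
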